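-- pv_equiv track=rewrite | github.com/bxd-user/office-agent | backend/app/planner.py | _reorder_fill_steps
-- ===== SOURCE A (Python) =====
-- def _reorder_fill_steps(steps: list[str]) -> list[str]:
--     ordered = []
--     for step in ["collect_source_text", "extract_fields", "write_docx", "summarize_result"]:
--         if step in steps:
--             ordered.append(step)
--
--     for step in steps:
--         if step not in ordered:
--             ordered.append(step)
--
--     return ordered
-- ===== SOURCE B (Python) =====
-- _RANK = {"collect_source_text": 0, "extract_fields": 1,
--          "write_docx": 2, "summarize_result": 3}
--
--
-- def _reorder_fill_steps(steps: list[str]) -> list[str]: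
--     # single-pass bucket sort: dedup by first occurrence, drop each step
--     # into its priority bucket (non-priority steps share the last bucket),
--     # then concatenate the buckets.
--     seen = set()
--     buckets = [[], [], [], [], []]
--     for s in steps:
--         if s not in seen:
--             seen.add(s)
--             buckets[_RANK.get(s, 4)].append(s)
--     return [s for b in buckets for s in b]
-- ===== Notes on version B (the rewrite author's own statement) =====
-- stated objective: faster
-- what changed: Replaced A's two sequential passes (priority scan with 'in steps' list tests, then a dedup pass rescanning the growing 'ordered' list) by a single pass that dedups with a hash set and drops each step into one of five rank buckets which are then concatenated.
import Mathlib
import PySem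

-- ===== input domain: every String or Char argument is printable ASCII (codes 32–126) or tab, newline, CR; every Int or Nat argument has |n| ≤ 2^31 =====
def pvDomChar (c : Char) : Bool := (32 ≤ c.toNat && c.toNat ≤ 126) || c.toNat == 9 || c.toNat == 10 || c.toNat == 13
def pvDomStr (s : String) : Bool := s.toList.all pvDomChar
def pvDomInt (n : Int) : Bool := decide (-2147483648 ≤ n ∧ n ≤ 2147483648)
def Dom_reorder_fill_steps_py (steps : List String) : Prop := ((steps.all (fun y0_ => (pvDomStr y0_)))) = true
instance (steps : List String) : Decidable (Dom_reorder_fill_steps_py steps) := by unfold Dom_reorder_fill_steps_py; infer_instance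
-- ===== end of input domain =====

-- B replaces A's two sequential passes by a single-pass seen-set + five rank buckets (alternative decomposition; return value equivalence proved).


-- ===== PORT A =====
def reorder_fill_steps_py (steps : List String) : List String :=
  -- first loop: append each priority step present in steps
  let ordered :=
    ["collect_source_text", "extract_fields", "write_docx", "summarize_result"].foldl
      (fun acc step => if step ∈ steps then acc ++ [step] else acc) []
  -- second loop: append remaining steps not already in ordered
  steps.foldl (fun acc step => if step ∈ acc then acc else acc ++ [step]) ordered

-- ===== PORT B =====
-- port of _RANK.get(s, 4) on the literal dict
def rankB (s : String) : Nat :=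
  if s = "collect_source_text" then 0
  else if s = "extract_fields" then 1
  else if s = "write_docx" then 2
  else if s = "summarize_result" then 3
  else 4

def reorder_fill_steps_py_alt (steps : List String) : List String :=
  let st :=
    steps.foldl
      (fun (acc : PySem.Set String × List (List String)) s =>
        if s ∈ acc.1 then acc
        else
          let r := rankB s
          (PySem.Set.add acc.1 s, acc.2.set r ((acc.2.getD r []) ++ [s])))
      (PySem.Set.empty, [[], [], [], [], []])
  st.2.flatten

-- ===== PRECONDITION & SPEC =====
def Spec_reorder_fill_steps_py (steps : List String) (out : List String) : Prop := out = reorder_fill_steps_py_alt steps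
instance (steps : List String) (out : List String) : Decidable (Spec_reorder_fill_steps_py steps out) := by unfold Spec_reorder_fill_steps_py; infer_instance

-- ===== CLAIM (what is proved, stated in full; the proofs are below) =====
def Claim_equal_reorder_fill_steps_py : Prop := ∀ (steps : List String), Dom_reorder_fill_steps_py steps → Spec_reorder_fill_steps_py steps (reorder_fill_steps_py steps)

-- ===== LEMMAS AND PROOFS =====

-- first-occurrence elements of l that are not already in seen
def fresh (seen : List String) : List String → List String
  | [] => []
  | s :: l => if s ∈ seen then fresh seen l else s :: fresh (s :: seen) l

theorem fresh_congr (l : List String) : ∀ s1 s2 : List String,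
    (∀ x, x ∈ s1 ↔ x ∈ s2) → fresh s1 l = fresh s2 l := by
  induction l with
  | nil => intro _ _ _; rfl
  | cons s l ih =>
    intro s1 s2 h
    simp only [fresh]
    by_cases hs : s ∈ s1
    · rw [if_pos hs, if_pos ((h s).1 hs)]; exact ih s1 s2 h
    · rw [if_neg hs, if_neg (fun hm => hs ((h s).2 hm))]
      refine congrArg _ (ih _ _ ?_)
      intro x; simp [h x]

theorem fresh_subset (l : List String) : ∀ seen x, x ∈ fresh seen l → x ∈ l := by
  induction l with
  | nil => intro _ _ h; simp [fresh] at h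
  | cons s l ih =>
    intro seen x h
    simp only [fresh] at h
    by_cases hs : s ∈ seen
    · rw [if_pos hs] at h
      exact List.mem_cons_of_mem _ (ih _ _ h)
    · rw [if_neg hs] at h
      rw [List.mem_cons] at h
      rcases h with h | h
      · simp [h]
      · exact List.mem_cons_of_mem _ (ih _ _ h)

theorem foldl_ins (l : List String) : ∀ acc : List String,
    l.foldl (fun acc step => if step ∈ acc then acc else acc ++ [step]) acc
      = acc ++ fresh acc l := by
  induction l with
  | nil => intro acc; simp [fresh]
  | cons s l ih =>
    intro acc
    simp only [List.foldl_cons, fresh]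
    by_cases hs : s ∈ acc
    · rw [if_pos hs, if_pos hs, ih]
    · rw [if_neg hs, if_neg hs, ih]
      rw [fresh_congr l (acc ++ [s]) (s :: acc) (by intro x; simp; tauto)]
      simp

-- filtering the fresh list by "∉ s2" = starting with s2 already seen
theorem fresh_filter_out (l : List String) : ∀ s1 s2 : List String,
    (fresh s1 l).filter (fun x => decide (x ∉ s2)) = fresh (s1 ++ s2) l := by
  induction l with
  | nil => intro _ _; rfl
  | cons s l ih =>
    intro s1 s2
    simp only [fresh]
    by_cases h1 : s ∈ s1
    · rw [if_pos h1, if_pos (by simp [h1]), ih]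
    · rw [if_neg h1]
      by_cases h2 : s ∈ s2
      · rw [if_pos (by simp [h2])]
        simp only [List.filter_cons, decide_eq_true_eq]
        rw [if_neg (by simp [h2]), ih]
        refine fresh_congr l _ _ ?_
        intro x
        simp only [List.cons_append, List.mem_cons, List.mem_append]
        constructor
        · rintro (rfl | h | h)
          · exact Or.inr h2
          · exact Or.inl h
          · exact Or.inr h
        · rintro (h | h)
          · exact Or.inr (Or.inl h)
          · exact Or.inr (Or.inr h)
      · rw [if_neg (by simp [h1, h2])]
        simp only [List.filter_cons, decide_eq_true_eq]
        rw [if_pos h2, ih]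
        rfl

theorem fresh_filter_single (l : List String) : ∀ (seen : List String) (v : String),
    (fresh seen l).filter (fun x => decide (x = v))
      = if v ∈ l ∧ v ∉ seen then [v] else [] := by
  induction l with
  | nil => intro seen v; simp [fresh]
  | cons s l ih =>
    intro seen v
    simp only [fresh]
    by_cases hs : s ∈ seen
    · rw [if_pos hs, ih]
      by_cases hv : v = s
      · subst hv; simp [hs]
      · simp [List.mem_cons, Ne.symm hv, hv]
    · rw [if_neg hs]
      simp only [List.filter_cons, decide_eq_true_eq]
      by_cases hv : s = v
      · subst hv
        rw [if_pos rfl, ih]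
        simp [hs]
      · rw [if_neg hv, ih]
        simp [List.mem_cons, Ne.symm hv, hv]

-- the B-side fold, named for the invariant lemma
def stepB (acc : PySem.Set String × List (List String)) (s : String) :
    PySem.Set String × List (List String) :=
  if s ∈ acc.1 then acc
  else (PySem.Set.add acc.1 s, acc.2.set (rankB s) ((acc.2.getD (rankB s) []) ++ [s]))

theorem stepB_eq :
    (fun (acc : PySem.Set String × List (List String)) s =>
        if s ∈ acc.1 then acc
        else
          let r := rankB s
          (PySem.Set.add acc.1 s, acc.2.set r ((acc.2.getD r []) ++ [s]))) = stepB := by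
  funext acc s
  simp [stepB]

-- bucket invariant for B's single pass
theorem foldl_stepB (l : List String) :
    ∀ (seen : List String) (b0 b1 b2 b3 b4 : List String),
    (l.foldl stepB (seen, [b0, b1, b2, b3, b4])).2
      = [b0 ++ (fresh seen l).filter (fun x => decide (rankB x = 0)),
         b1 ++ (fresh seen l).filter (fun x => decide (rankB x = 1)),
         b2 ++ (fresh seen l).filter (fun x => decide (rankB x = 2)),
         b3 ++ (fresh seen l).filter (fun x => decide (rankB x = 3)),
         b4 ++ (fresh seen l).filter (fun x => decide (rankB x = 4))] := by
  induction l with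
  | nil => intro seen b0 b1 b2 b3 b4; simp [fresh]
  | cons s l ih =>
    intro seen b0 b1 b2 b3 b4
    have hcongr :
        fresh (PySem.Set.add seen s) l = fresh (s :: seen) l := by
      refine fresh_congr l _ _ ?_
      intro x
      rw [PySem.Set.mem_add]
      simp only [List.mem_cons]
      tauto
    simp only [List.foldl_cons, stepB, fresh]
    by_cases hs : s ∈ seen
    · rw [if_pos hs, if_pos hs, ih]
    · rw [if_neg hs, if_neg hs]
      by_cases e0 : s = "collect_source_text"
      · subst e0
        rw [show ([b0, b1, b2, b3, b4] : List (List String)).set (rankB "collect_source_text")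
              (([b0, b1, b2, b3, b4].getD (rankB "collect_source_text") []) ++ ["collect_source_text"])
            = [b0 ++ ["collect_source_text"], b1, b2, b3, b4] from rfl]
        rw [ih, hcongr]
        simp [List.filter_cons, rankB]
      · by_cases e1 : s = "extract_fields"
        · subst e1
          rw [show ([b0, b1, b2, b3, b4] : List (List String)).set (rankB "extract_fields")
                (([b0, b1, b2, b3, b4].getD (rankB "extract_fields") []) ++ ["extract_fields"])
              = [b0, b1 ++ ["extract_fields"], b2, b3, b4] from rfl]
          rw [ih, hcongr]
          simp [List.filter_cons, rankB]
        · by_cases e2 : s = "write_docx"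
          · subst e2
            rw [show ([b0, b1, b2, b3, b4] : List (List String)).set (rankB "write_docx")
                  (([b0, b1, b2, b3, b4].getD (rankB "write_docx") []) ++ ["write_docx"])
                = [b0, b1, b2 ++ ["write_docx"], b3, b4] from rfl]
            rw [ih, hcongr]
            simp [List.filter_cons, rankB]
          · by_cases e3 : s = "summarize_result"
            · subst e3
              rw [show ([b0, b1, b2, b3, b4] : List (List String)).set (rankB "summarize_result")
                    (([b0, b1, b2, b3, b4].getD (rankB "summarize_result") []) ++ ["summarize_result"])
                  = [b0, b1, b2, b3 ++ ["summarize_result"], b4] from rfl]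
              rw [ih, hcongr]
              simp [List.filter_cons, rankB]
            · have hr : rankB s = 4 := by simp [rankB, e0, e1, e2, e3]
              rw [hr]
              rw [show ([b0, b1, b2, b3, b4] : List (List String)).set 4
                    (([b0, b1, b2, b3, b4].getD 4 []) ++ [s])
                  = [b0, b1, b2, b3, b4 ++ [s]] from rfl]
              rw [ih, hcongr]
              simp [List.filter_cons, hr]

theorem rankB_eq_four (s : String) : rankB s = 4 ↔
    s ≠ "collect_source_text" ∧ s ≠ "extract_fields" ∧ s ≠ "write_docx" ∧ s ≠ "summarize_result" := by
  unfold rankB; split_ifs <;> simp_all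

theorem rankB_eq_zero (s : String) : rankB s = 0 ↔ s = "collect_source_text" := by
  unfold rankB; split_ifs <;> simp_all

theorem rankB_eq_one (s : String) : rankB s = 1 ↔ s = "extract_fields" := by
  unfold rankB; split_ifs <;> simp_all

theorem rankB_eq_two (s : String) : rankB s = 2 ↔ s = "write_docx" := by
  unfold rankB; split_ifs <;> simp_all

theorem rankB_eq_three (s : String) : rankB s = 3 ↔ s = "summarize_result" := by
  unfold rankB; split_ifs <;> simp_all

-- A's first loop equals the concatenation of the four singleton buckets
theorem firstLoop_eq (steps : List String) :
    (["collect_source_text", "extract_fields", "write_docx", "summarize_result"].foldl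
      (fun acc step => if step ∈ steps then acc ++ [step] else acc) [])
    = (if ("collect_source_text" : String) ∈ steps then ["collect_source_text"] else [])
      ++ (if ("extract_fields" : String) ∈ steps then ["extract_fields"] else [])
      ++ (if ("write_docx" : String) ∈ steps then ["write_docx"] else [])
      ++ (if ("summarize_result" : String) ∈ steps then ["summarize_result"] else []) := by
  simp only [List.foldl_cons, List.foldl_nil]
  split_ifs <;> simp

-- ===== VERDICT (by name: the statement is the Claim_ definition above) =====
theorem reorder_fill_steps_py_spec : Claim_equal_reorder_fill_steps_py := by
  intro steps _
  unfold Spec_reorder_fill_steps_py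
  have ha : reorder_fill_steps_py steps
      = steps.foldl (fun acc step => if step ∈ acc then acc else acc ++ [step])
          (["collect_source_text", "extract_fields", "write_docx", "summarize_result"].foldl
            (fun acc step => if step ∈ steps then acc ++ [step] else acc) []) := rfl
  have halt : reorder_fill_steps_py_alt steps
      = (steps.foldl stepB (([] : List String), [[], [], [], [], []])).2.flatten := by
    rw [← stepB_eq]; rfl
  rw [ha, halt, firstLoop_eq, foldl_ins, foldl_stepB]
  -- name the four priority buckets
  set P : List String :=
    (if ("collect_source_text" : String) ∈ steps then ["collect_source_text"] else [])
      ++ (if ("extract_fields" : String) ∈ steps then ["extract_fields"] else [])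
      ++ (if ("write_docx" : String) ∈ steps then ["write_docx"] else [])
      ++ (if ("summarize_result" : String) ∈ steps then ["summarize_result"] else []) with hP
  have hmem1 : ∀ v x : String, x ∈ (if v ∈ steps then [v] else []) ↔ (x = v ∧ x ∈ steps) := by
    intro v x
    split_ifs with h
    · constructor
      · intro hx; rw [List.mem_singleton] at hx; exact ⟨hx, hx ▸ h⟩
      · intro hx; rw [List.mem_singleton]; exact hx.1
    · constructor
      · intro hx; cases hx
      · rintro ⟨rfl, hx⟩; exact absurd hx h
  have hPmem : ∀ x, x ∈ P ↔
      ((x = "collect_source_text" ∨ x = "extract_fields" ∨ x = "write_docx"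
        ∨ x = "summarize_result") ∧ x ∈ steps) := by
    intro x
    rw [hP]
    simp only [List.mem_append, hmem1]
    tauto
  have hsingle : ∀ (v : String) (k : Nat), (∀ x, rankB x = k ↔ x = v) →
      (fresh [] steps).filter (fun x => decide (rankB x = k))
        = if v ∈ steps then [v] else [] := by
    intro v k hiff
    have : (fun x => decide (rankB x = k)) = (fun x => decide (x = v)) :=
      funext fun x => decide_eq_decide.mpr (hiff x)
    rw [this, fresh_filter_single]
    simp
  -- rank-4 bucket equals the fresh remainder after seeing P
  have h4 : (fresh [] steps).filter (fun x => decide (rankB x = 4)) = fresh P steps := by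
    have h1 : (fresh [] steps).filter (fun x => decide (x ∉ P)) = fresh P steps := by
      have := fresh_filter_out steps [] P
      simpa using this
    rw [← h1]
    apply List.filter_congr
    intro x hx
    have hxs : x ∈ steps := fresh_subset steps [] x hx
    have hiff : (rankB x = 4) ↔ (x ∉ P) := by
      rw [rankB_eq_four, hPmem]
      constructor
      · rintro ⟨n0, n1, n2, n3⟩ ⟨h, _⟩
        rcases h with rfl | rfl | rfl | rfl <;> simp_all
      · intro hnp
        refine ⟨?_, ?_, ?_, ?_⟩ <;> rintro rfl <;> exact hnp ⟨by tauto, hxs⟩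
    exact decide_eq_decide.mpr hiff
  rw [h4,
    hsingle "collect_source_text" 0 rankB_eq_zero,
    hsingle "extract_fields" 1 rankB_eq_one,
    hsingle "write_docx" 2 rankB_eq_two,
    hsingle "summarize_result" 3 rankB_eq_three]
  rw [hP]
  simp [List.flatten]
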